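-- pv_equiv track=rewrite | github.com/ketanpurohit0/python | elements_of_python_programming/Test1.py | solution
-- ===== SOURCE A (Python) =====
-- def solution(T):
--
--     seasons = ["WINTER", "SPRING", "SUMMER", "AUTUMN"]
--     temp_ranges_per_season = []
--     step_size = len(T)//4
--     for r in range(4):
--         # take slices and get max and min per slice from left to right
--         max_for_season_r = max(T[r*step_size:r*step_size+(step_size-1)+1])
--         min_for_season_r = min(T[r*step_size:r*step_size+(step_size-1)+1])
--         # calculate temperature range
--         range_for_season_r = max_for_season_r-min_for_season_r
--         # add temperature range to collection
--         temp_ranges_per_season.append(range_for_season_r)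
--
--     # get the index of the highest range
--     index_of_season_with_highest_range = temp_ranges_per_season.index(max(temp_ranges_per_season))
--     # return the season name
--     return seasons[index_of_season_with_highest_range]
-- ===== SOURCE B (Python) =====
-- def solution(T):
--     seasons = ["WINTER", "SPRING", "SUMMER", "AUTUMN"]
--     step_size = len(T) // 4
--     # single element-wise pass: bucket each index into its season and keep
--     # per-season running high/low; no slices, no per-season max()/min() calls
--     hi = [None] * 4
--     lo = [None] * 4
--     for i in range(4 * step_size):
--         q = i // step_size
--         v = T[i]
--         if hi[q] is None or v > hi[q]:
--             hi[q] = v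
--         if lo[q] is None or v < lo[q]:
--             lo[q] = v
--     best = max(range(4), key=lambda q: hi[q] - lo[q])
--     return seasons[best]
-- ===== Notes on version B (the rewrite author's own statement) =====
-- stated objective: alternative
-- what changed: Replaces the four per-season slice+max()+min() passes with one element-wise bucketed pass (q = i // step_size keeps running per-season high/low in two arrays), then picks the season with max(range(4), key=...) instead of list-building plus list.index(max(...)).
import Mathlib
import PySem

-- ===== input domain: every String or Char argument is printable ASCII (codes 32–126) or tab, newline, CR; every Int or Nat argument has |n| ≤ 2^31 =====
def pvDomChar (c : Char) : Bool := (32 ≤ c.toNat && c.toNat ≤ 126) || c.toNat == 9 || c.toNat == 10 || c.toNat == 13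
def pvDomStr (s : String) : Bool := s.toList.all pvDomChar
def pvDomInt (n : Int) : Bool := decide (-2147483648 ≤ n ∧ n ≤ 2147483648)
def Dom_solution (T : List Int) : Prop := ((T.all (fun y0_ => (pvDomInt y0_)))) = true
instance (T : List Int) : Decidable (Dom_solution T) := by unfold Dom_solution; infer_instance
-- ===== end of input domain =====

-- B replaces the four per-season slice+max()+min() passes by one element-wise bucketed pass
-- (q = i // step_size, running per-season high/low arrays) and picks the winner with
-- max(range(4), key=...) instead of building the list of ranges and re-scanning it.

-- ===== PORT A =====
-- Port of A. The `.getD` defaults are only reached where Python raises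
-- (max/min of an empty slice, i.e. len(T) < 4); Pre_solution excludes exactly those inputs.
def solution (T : List Int) : String :=
  let seasons : List String := ["WINTER", "SPRING", "SUMMER", "AUTUMN"]
  let step : Int := PySem.Int.floordiv (T.length : Int) 4
  let ranges : List Int :=
    (PySem.List.pyRange 0 4 1).foldl (fun acc r =>
      let sl := PySem.List.slice T (some (r * step)) (some (r * step + (step - 1) + 1))
      let mx := (PySem.List.max? sl (fun x => x)).getD 0
      let mn := (PySem.List.min? sl (fun x => x)).getD 0
      acc ++ [mx - mn]) []
  let idx : Nat :=
    (PySem.List.index? ranges ((PySem.List.max? ranges (fun x => x)).getD 0)).getD 0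
  (PySem.List.pyGet? seasons (idx : Int)).getD ""

-- ===== PORT B =====
-- B-side helpers: the two `if hi[q] is None or v > hi[q]` / `if lo[q] is None or v < lo[q]` updates.
def updHi (hi : List (Option Int)) (q : Nat) (v : Int) : List (Option Int) :=
  match hi.getD q none with
  | none => hi.set q (some v)
  | some h => if h < v then hi.set q (some v) else hi

def updLo (lo : List (Option Int)) (q : Nat) (v : Int) : List (Option Int) :=
  match lo.getD q none with
  | none => lo.set q (some v)
  | some l => if v < l then lo.set q (some v) else lo

-- Port of B (Source B). Inside the loop 0 ≤ i < 4*step ≤ len T, so `.toNat` on q and the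
-- `.getD 0` on T[i] are exact; the final `.getD 0` on hi[q]/lo[q] is only reached where
-- Python raises (len(T) < 4, excluded by Pre_solution).
def solution_alt (T : List Int) : String :=
  let seasons : List String := ["WINTER", "SPRING", "SUMMER", "AUTUMN"]
  let step : Int := PySem.Int.floordiv (T.length : Int) 4
  let st : List (Option Int) × List (Option Int) :=
    (PySem.List.pyRange 0 (4 * step) 1).foldl
      (fun st i =>
        let q : Nat := (PySem.Int.floordiv i step).toNat
        let v : Int := (PySem.List.pyGet? T i).getD 0
        (updHi st.1 q v, updLo st.2 q v))
      (List.replicate 4 none, List.replicate 4 none)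
  let key : Int → Int := fun q => (st.1.getD q.toNat none).getD 0 - (st.2.getD q.toNat none).getD 0
  let best : Int := (PySem.List.max? (PySem.List.pyRange 0 4 1) key).getD 0
  (PySem.List.pyGet? seasons best).getD ""

-- ===== PRECONDITION & SPEC =====
-- Pre_: len(T) >= 4. For len(T) < 4, step_size = 0, so A takes max() of an empty slice
-- (ValueError) and B subtracts None - None in its key (TypeError): both raise.
def Pre_solution (T : List Int) : Prop := 4 ≤ T.length
instance (T : List Int) : Decidable (Pre_solution T) := by unfold Pre_solution; infer_instance
def pvWitness_solution : List Int := [3, 1, 4, 1, 5]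

def Spec_solution (T : List Int) (out : String) : Prop := out = solution_alt T
instance (T : List Int) (out : String) : Decidable (Spec_solution T out) := by unfold Spec_solution; infer_instance

-- ===== CLAIM (what is proved, stated in full; the proofs are below) =====
def Claim_equal_solution : Prop := ∀ (T : List Int), Dom_solution T → Pre_solution T → Spec_solution T (solution T)

-- ===== LEMMAS AND PROOFS =====

-- one season's cell, fed the season's values in order
def cellStep (c : Option Int × Option Int) (v : Int) : Option Int × Option Int :=
  (some (match c.1 with | none => v | some h => max h v),
   some (match c.2 with | none => v | some l => min l v))

-- the values of season q's slice, read off by index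
def chunkOf (T : List Int) (a s : Nat) : List Int := (List.range s).map (fun j => T.getD (a+j) 0)

lemma chunk_slice (T : List Int) (a s : Nat) (h : a + s ≤ T.length) :
    (T.drop a).take s = chunkOf T a s := by
  apply List.ext_getElem
  · simp [chunkOf]; omega
  · intro j hj1 hj2
    simp [chunkOf] at hj2 ⊢
    rw [List.getElem?_eq_getElem (by omega)]
    simp [Nat.add_comm a j]

lemma chunk_ne_nil (T : List Int) (a s : Nat) (hs : 0 < s) : chunkOf T a s ≠ [] := by
  simp [chunkOf, List.range_eq_nil]; omega

lemma updHi_eq_set (hi : List (Option Int)) (q : Nat) (v : Int) (hq : q < hi.length) :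
    updHi hi q v = hi.set q (some (match hi.getD q none with | none => v | some h => max h v)) := by
  unfold updHi
  rcases h : hi.getD q none with _ | h'
  · rfl
  · dsimp only
    split_ifs with hc
    · simp [max_eq_right (le_of_lt hc)]
    · rw [max_eq_left (by omega)]
      rw [List.getD_eq_getElem?_getD, List.getElem?_eq_getElem hq] at h
      simp only [Option.getD_some] at h
      rw [← h, List.set_getElem_self]

lemma updLo_eq_set (lo : List (Option Int)) (q : Nat) (v : Int) (hq : q < lo.length) :
    updLo lo q v = lo.set q (some (match lo.getD q none with | none => v | some l => min l v)) := by
  unfold updLo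
  rcases h : lo.getD q none with _ | l'
  · rfl
  · dsimp only
    split_ifs with hc
    · simp [min_eq_right (le_of_lt hc)]
    · rw [min_eq_left (by omega)]
      rw [List.getD_eq_getElem?_getD, List.getElem?_eq_getElem hq] at h
      simp only [Option.getD_some] at h
      rw [← h, List.set_getElem_self]

lemma pair_fold (vs : List Int) (q : Nat) :
    ∀ (hi lo : List (Option Int)), q < hi.length → q < lo.length →
    vs.foldl (fun st v => (updHi st.1 q v, updLo st.2 q v)) (hi, lo)
      = (hi.set q (vs.foldl cellStep (hi.getD q none, lo.getD q none)).1,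
         lo.set q (vs.foldl cellStep (hi.getD q none, lo.getD q none)).2) := by
  induction vs with
  | nil =>
    intro hi lo h1 h2
    simp only [List.foldl_nil]
    rw [List.getD_eq_getElem?_getD, List.getElem?_eq_getElem h1,
        List.getD_eq_getElem?_getD, List.getElem?_eq_getElem h2]
    simp [List.set_getElem_self]
  | cons v vs ih =>
    intro hi lo h1 h2
    simp only [List.foldl_cons]
    rw [updHi_eq_set _ _ _ h1, updLo_eq_set _ _ _ h2]
    rw [ih _ _ (by simpa using h1) (by simpa using h2)]
    rw [List.getD_eq_getElem?_getD (l := hi.set q _), List.getElem?_set_self',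
        List.getD_eq_getElem?_getD (l := lo.set q _), List.getElem?_set_self']
    simp only [List.getElem?_eq_getElem h1, List.getElem?_eq_getElem h2, List.set_set]
    have hcell : cellStep (hi.getD q none, lo.getD q none) v
         = (some (match hi.getD q none with | none => v | some h => max h v),
            some (match lo.getD q none with | none => v | some l => min l v)) := rfl
    rw [hcell]
    simp [List.getD_eq_getElem?_getD, List.getElem?_eq_getElem h1, List.getElem?_eq_getElem h2]

lemma cell_run (t : List Int) : ∀ (a b : Int),
    t.foldl cellStep (some a, some b) = (some (t.foldl max a), some (t.foldl min b)) := by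
  induction t with
  | nil => intro a b; rfl
  | cons v t ih => intro a b; simpa [cellStep] using ih (max a v) (min b v)

lemma cell_eq_maxmin (l : List Int) (hl : l ≠ []) :
    l.foldl cellStep (none, none)
      = (PySem.List.max? l (fun x => x), PySem.List.min? l (fun x => x)) := by
  cases l with
  | nil => exact absurd rfl hl
  | cons v t =>
    rw [PySem.List.max?_id_cons, PySem.List.min?_id_cons]
    show t.foldl cellStep (some v, some v) = _
    exact cell_run t v v

-- one season's stretch of B's index loop is pair_fold on that season's values
lemma fold_chunk (T : List Int) (s q : Nat) (hs : 0 < s)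
    (hi lo : List (Option Int)) (h1 : q < hi.length) (h2 : q < lo.length) :
    (PySem.List.pyRange ((q*s : Nat) : Int) (((q+1)*s : Nat) : Int) 1).foldl
      (fun st i => (updHi st.1 (PySem.Int.floordiv i ((s : Nat) : Int)).toNat ((PySem.List.pyGet? T i).getD 0),
                    updLo st.2 (PySem.Int.floordiv i ((s : Nat) : Int)).toNat ((PySem.List.pyGet? T i).getD 0))) (hi, lo)
    = (hi.set q ((chunkOf T (q*s) s).foldl cellStep (hi.getD q none, lo.getD q none)).1,
       lo.set q ((chunkOf T (q*s) s).foldl cellStep (hi.getD q none, lo.getD q none)).2) := by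
  rw [PySem.List.pyRange_one]
  have hc : ((((q+1)*s : Nat) : Int) - ((q*s : Nat) : Int)).toNat = s := by
    rw [← Nat.cast_sub (Nat.mul_le_mul_right s (by omega))]
    rw [Int.toNat_natCast]
    have : (q+1)*s = q*s + s := by ring
    omega
  rw [hc, List.foldl_map]
  have hcong : ∀ (st : List (Option Int) × List (Option Int)) (j : Nat), j ∈ List.range s →
      (updHi st.1 (PySem.Int.floordiv (((q*s : Nat) : Int) + j) ((s : Nat) : Int)).toNat ((PySem.List.pyGet? T (((q*s : Nat) : Int) + j)).getD 0),
       updLo st.2 (PySem.Int.floordiv (((q*s : Nat) : Int) + j) ((s : Nat) : Int)).toNat ((PySem.List.pyGet? T (((q*s : Nat) : Int) + j)).getD 0))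
      = (updHi st.1 q (T.getD (q*s+j) 0), updLo st.2 q (T.getD (q*s+j) 0)) := by
    intro st j hj
    rw [List.mem_range] at hj
    have hi1 : ((q*s : Nat) : Int) + (j : Int) = ((q*s+j : Nat) : Int) := by push_cast; ring
    have hdiv : (q*s+j)/s = q := by
      rw [Nat.mul_comm q s, Nat.mul_add_div hs]
      simp [Nat.div_eq_of_lt hj]
    simp only [hi1, PySem.Int.floordiv_natCast, Int.toNat_natCast, hdiv,
      PySem.List.pyGet?_natCast, ← List.getD_eq_getElem?_getD]
  refine Eq.trans (PySem.List.foldl_congr_mem _ _ _ _ hcong) ?_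
  have hp := pair_fold (chunkOf T (q*s) s) q hi lo h1 h2
  rw [show chunkOf T (q*s) s = (List.range s).map (fun j => T.getD (q*s+j) 0) from rfl,
      List.foldl_map] at hp
  exact hp

-- first-argmax of the four ranges: A's list.index(max(...)) = B's max(range(4), key=...)
lemma pick (d0 d1 d2 d3 : Int) (f : Int → Int)
    (h0 : f 0 = d0) (h1 : f 1 = d1) (h2 : f 2 = d2) (h3 : f 3 = d3) :
  (((PySem.List.index? [d0,d1,d2,d3] ((PySem.List.max? [d0,d1,d2,d3] (fun x => x)).getD 0)).getD 0 : Nat) : Int)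
  = (PySem.List.max? [(0:Int),1,2,3] f).getD 0 := by
  simp only [List.foldl, PySem.List.index?_eq_idxOf?, List.idxOf?, List.findIdx?,
    List.findIdx?.go, PySem.List.max?, h0, h1, h2, h3]
  by_cases g1 : d0 < d1
  · by_cases g2 : d1 < d2
    · by_cases g3 : d2 < d3
      ·        simp [h1, h2, g1, g2, g3, beq_iff_eq, show d0 ≠ d3 by omega,
          show d1 ≠ d3 by omega, show d2 ≠ d3 by omega]
      ·        simp [h1, h2, g1, g2, g3, beq_iff_eq, show d0 ≠ d2 by omega,
          show d1 ≠ d2 by omega]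
    · by_cases g3 : d1 < d3
      ·        simp [h1, g1, g2, g3, beq_iff_eq, show d0 ≠ d3 by omega,
          show d1 ≠ d3 by omega, show d2 ≠ d3 by omega]
      ·        simp [h1, g1, g2, g3, beq_iff_eq, show d0 ≠ d1 by omega]
  · by_cases g2 : d0 < d2
    · by_cases g3 : d2 < d3
      ·        simp [h0, h2, g1, g2, g3, beq_iff_eq, show d0 ≠ d3 by omega,
          show d1 ≠ d3 by omega, show d2 ≠ d3 by omega]
      ·        simp [h0, h2, g1, g2, g3, beq_iff_eq, show d0 ≠ d2 by omega,
          show d1 ≠ d2 by omega]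
    · by_cases g3 : d0 < d3
      ·        simp [h0, g1, g2, g3, beq_iff_eq, show d0 ≠ d3 by omega,
          show d1 ≠ d3 by omega, show d2 ≠ d3 by omega]
      ·        simp [h0, g1, g2, g3]

lemma slice_chunk (T : List Int) (s : Nat) (qa qb : Int) (a : Nat)
    (ha : qa = (a : Int)) (hb : qb = ((a+s : Nat) : Int)) (hT : a + s ≤ T.length) :
    PySem.List.slice T (some qa) (some qb) = chunkOf T a s := by
  subst ha hb
  rw [PySem.List.slice_natCast, show a+s-a = s from by omega]
  exact chunk_slice T a s hT

lemma solution_eq (T : List Int) (hP : Pre_solution T) : solution T = solution_alt T := by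
  have hn : 4 ≤ T.length := hP
  have hstep : PySem.Int.floordiv (T.length : Int) 4 = ((T.length/4 : Nat) : Int) := by
    exact_mod_cast PySem.Int.floordiv_natCast T.length 4
  set s : Nat := T.length/4 with hs_def
  have hs : 0 < s := by omega
  have h4 : 4*s ≤ T.length := by omega
  have hr4 : PySem.List.pyRange 0 4 1 = [0,1,2,3] := by decide
  simp only [solution, solution_alt, hr4, hstep, List.foldl, List.nil_append, List.cons_append]
  -- A side: each slice is that season's chunk
  rw [slice_chunk T s ((0:Int)*(s:Int)) ((0:Int)*(s:Int)+((s:Int)-1)+1) (0*s) (by push_cast; ring)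
        (by push_cast; ring) (by omega),
      slice_chunk T s ((1:Int)*(s:Int)) ((1:Int)*(s:Int)+((s:Int)-1)+1) (1*s) (by push_cast; ring)
        (by push_cast; ring) (by omega),
      slice_chunk T s ((2:Int)*(s:Int)) ((2:Int)*(s:Int)+((s:Int)-1)+1) (2*s) (by push_cast; ring)
        (by push_cast; ring) (by omega),
      slice_chunk T s ((3:Int)*(s:Int)) ((3:Int)*(s:Int)+((s:Int)-1)+1) (3*s) (by push_cast; ring)
        (by push_cast; ring) (by omega)]
  -- B side: split the index loop into the four seasons' stretches
  rw [show (4:Int) * (s:Int) = ((4*s : Nat) : Int) from by push_cast; ring]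
  have hsplit : PySem.List.pyRange 0 ((4*s : Nat) : Int) 1
      = PySem.List.pyRange ((0*s : Nat) : Int) (((0+1)*s : Nat) : Int) 1
        ++ (PySem.List.pyRange ((1*s : Nat) : Int) (((1+1)*s : Nat) : Int) 1
        ++ (PySem.List.pyRange ((2*s : Nat) : Int) (((2+1)*s : Nat) : Int) 1
        ++ PySem.List.pyRange ((3*s : Nat) : Int) (((3+1)*s : Nat) : Int) 1)) := by
    simp only [show (0*s : Nat) = 0 from by ring, show ((0+1)*s : Nat) = s from by ring,
      show ((1+1)*s : Nat) = 2*s from by ring, show ((2+1)*s : Nat) = 3*s from by ring,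
      show ((3+1)*s : Nat) = 4*s from by ring, Nat.cast_zero]
    rw [← PySem.List.pyRange_one_append ((2*s : Nat) : Int) ((3*s : Nat) : Int) ((4*s : Nat) : Int)
          (by push_cast; omega) (by push_cast; omega),
        ← PySem.List.pyRange_one_append ((s : Nat) : Int) ((2*s : Nat) : Int) ((4*s : Nat) : Int)
          (by push_cast; omega) (by push_cast; omega),
        ← PySem.List.pyRange_one_append 0 ((s : Nat) : Int) ((4*s : Nat) : Int)
          (by omega) (by push_cast; omega)]
  rw [hsplit, List.foldl_append, List.foldl_append, List.foldl_append]
  rw [fold_chunk T s 0 hs (List.replicate 4 none) (List.replicate 4 none) (by simp) (by simp)]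
  rw [fold_chunk T s 1 hs _ _ (by simp) (by simp)]
  rw [fold_chunk T s 2 hs _ _ (by simp) (by simp)]
  rw [fold_chunk T s 3 hs _ _ (by simp) (by simp)]
  simp only [show List.replicate 4 (none : Option Int) = [none,none,none,none] from rfl,
    List.set, List.getD, List.getElem?_cons_zero, List.getElem?_cons_succ, Option.getD_some]
  rw [cell_eq_maxmin (chunkOf T (0*s) s) (chunk_ne_nil T (0*s) s hs),
      cell_eq_maxmin (chunkOf T (1*s) s) (chunk_ne_nil T (1*s) s hs),
      cell_eq_maxmin (chunkOf T (2*s) s) (chunk_ne_nil T (2*s) s hs),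
      cell_eq_maxmin (chunkOf T (3*s) s) (chunk_ne_nil T (3*s) s hs)]
  exact congrArg (fun z : Int => (PySem.List.pyGet? ["WINTER","SPRING","SUMMER","AUTUMN"] z).getD "")
    (pick _ _ _ _ _ rfl rfl rfl rfl)

-- ===== VERDICT (by name: the statement is the Claim_ definition above) =====
theorem solution_spec : Claim_equal_solution := by
  intro T _hD hP
  unfold Spec_solution
  exact solution_eq T hP
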